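-- pv_equiv track=rewrite | github.com/Hazel-J-Nova/discord-Bot | python/soup_test.py | plan_counts
-- ===== SOURCE A (Python) =====
-- def plan_counts(arr, plan_count):
--
--     for i in arr:
--         if i.startswith("[X]") or i.startswith("[x]"):
--             if i in plan_count:
--                 plan_count[i] += 1
--             else:
--                 plan_count[i] = 1
--     return plan_count
-- ===== SOURCE B (Python) =====
-- def plan_counts(arr, plan_count):
--     # Brute force per distinct key: no incremental tally at all.
--     matched = [i for i in arr if i.startswith(("[X]", "[x]"))]
--     for k in dict.fromkeys(matched):  # distinct keys, first-occurrence order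
--         plan_count[k] = plan_count.get(k, 0) + matched.count(k)
--     return plan_count
-- ===== Notes on version B (the rewrite author's own statement) =====
-- stated objective: alternative
-- what changed: B abandons A's per-element increment into the target dict: it collects the matching lines, then for each DISTINCT matching line (first-occurrence order) scan-counts its multiplicity with list.count and adds that total into plan_count once; counting is by repeated whole-list scans, not by an accumulator.
import Mathlib
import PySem

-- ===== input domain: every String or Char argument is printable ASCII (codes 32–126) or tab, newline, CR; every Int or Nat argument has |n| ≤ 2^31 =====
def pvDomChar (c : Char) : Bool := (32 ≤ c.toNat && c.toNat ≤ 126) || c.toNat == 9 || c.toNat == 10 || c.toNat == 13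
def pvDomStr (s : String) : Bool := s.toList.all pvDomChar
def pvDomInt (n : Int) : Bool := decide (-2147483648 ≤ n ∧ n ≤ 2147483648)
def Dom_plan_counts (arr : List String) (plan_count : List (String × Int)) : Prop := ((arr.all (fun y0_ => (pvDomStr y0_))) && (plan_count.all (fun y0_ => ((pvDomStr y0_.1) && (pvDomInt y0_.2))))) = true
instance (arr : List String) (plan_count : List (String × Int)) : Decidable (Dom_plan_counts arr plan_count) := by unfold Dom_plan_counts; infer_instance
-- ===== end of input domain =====

-- B replaces A's per-element increment of the target dict by brute-force counting: collect the
-- matching lines, then for each distinct one scan-count it with list.count and add the total once.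


-- ===== PORT A =====
-- the plan-line predicate: i.startswith("[X]") or i.startswith("[x]")
def pvMatch (i : String) : Bool := PySem.Str.startswith i "[X]" || PySem.Str.startswith i "[x]"

def plan_counts (arr : List String) (plan_count : List (String × Int)) : List (String × Int) :=
  (arr.foldl (fun d i =>
      if pvMatch i then
        if d.contains i then d.modify i 0 (· + 1) else d.insert i 1
      else d)
    (PySem.Dict.ofList plan_count)).items

-- ===== PORT B =====
def plan_counts_alt (arr : List String) (plan_count : List (String × Int)) : List (String × Int) :=
  -- matched = [i for i in arr if i.startswith(("[X]", "[x]"))]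
  let matched := arr.filter pvMatch
  -- for k in dict.fromkeys(matched): plan_count[k] = plan_count.get(k, 0) + matched.count(k)
  ((PySem.Set.ofList matched).foldl
      (fun pd k => pd.insert k (pd.getD k 0 + (matched.count k : Int)))
      (PySem.Dict.ofList plan_count)).items

-- ===== PRECONDITION & SPEC =====
def Spec_plan_counts (arr : List String) (plan_count : List (String × Int)) (out : List (String × Int)) : Prop := out = plan_counts_alt arr plan_count
instance (arr : List String) (plan_count : List (String × Int)) (out : List (String × Int)) : Decidable (Spec_plan_counts arr plan_count out) := by unfold Spec_plan_counts; infer_instance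

-- ===== CLAIM (what is proved, stated in full; the proofs are below) =====
def Claim_equal_plan_counts : Prop := ∀ (arr : List String) (plan_count : List (String × Int)), Dom_plan_counts arr plan_count → Spec_plan_counts arr plan_count (plan_counts arr plan_count)

-- ===== LEMMAS AND PROOFS =====

-- A's branchy update is the unconditional counting insert
lemma pvStepA_eq (d : PySem.Dict String Int) (i : String) :
    (if d.contains i then d.modify i 0 (· + 1) else d.insert i 1) = d.insert i (d.getD i 0 + 1) := by
  by_cases h : d.contains i = true
  · rw [if_pos h]; rfl
  · rw [if_neg h, PySem.Dict.getD_of_not_contains d 0 (by simpa using h)]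
    norm_num

-- getD of A's counting fold
lemma pvGetD_fold1 (ys : List String) (d : PySem.Dict String Int) (k : String) :
    (ys.foldl (fun d i => d.insert i (d.getD i 0 + 1)) d).getD k 0
      = d.getD k 0 + ys.count k := by
  induction ys generalizing d with
  | nil => simp
  | cons y t ih =>
    simp only [List.foldl_cons, ih, List.count_cons]
    by_cases h : k = y
    · subst h; simp [PySem.Dict.getD_insert_self]; omega
    · rw [PySem.Dict.getD_insert_of_ne _ _ _ h]
      have h2 : ¬ y = k := fun he => h he.symm
      simp [h2]

-- keys of A's counting fold: existing keys, then new matching keys in first-occurrence order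
lemma pvKeys_fold1 (ys : List String) (d : PySem.Dict String Int) :
    (ys.foldl (fun d i => d.insert i (d.getD i 0 + 1)) d).keys
      = d.keys ++ (PySem.Set.ofList ys).filter (fun k => !(d.contains k)) := by
  induction ys generalizing d with
  | nil => simp [PySem.Set.ofList]
  | cons y t ih =>
    simp only [List.foldl_cons, ih, PySem.Set.ofList_cons]
    have hcomm : List.filter (fun k => !(k == y) && !(d.contains k)) (PySem.Set.ofList t)
        = List.filter (fun a => !(d.contains a) && !(a == y)) (PySem.Set.ofList t) := by
      apply List.filter_congr
      intro x _
      exact Bool.and_comm _ _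
    by_cases hy : d.contains y = true
    · rw [PySem.Dict.keys_insert_of_contains d _ hy]
      have hpred : (fun k => !((d.insert y (d.getD y 0 + 1)).contains k))
          = fun k => !(k == y) && !(d.contains k) := by
        funext k
        rw [PySem.Dict.contains_insert]
        by_cases hk : k = y
        · subst hk; simp [hy]
        · simp
      rw [hpred]
      have hds : (PySem.Set.ofList t).discard y
          = List.filter (fun k => !(k == y)) (PySem.Set.ofList t) := rfl
      rw [hds, List.filter_cons]
      simp only [hy, Bool.not_true, List.filter_filter, Bool.false_eq_true, if_false]
      rw [hcomm]
    · rw [PySem.Dict.keys_insert_of_not_contains d _ (by simpa using hy)]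
      have hpred : (fun k => !((d.insert y (d.getD y 0 + 1)).contains k))
          = fun k => !(k == y) && !(d.contains k) := by
        funext k
        rw [PySem.Dict.contains_insert]
        by_cases hk : k = y
        · subst hk; simp
        · simp
      rw [hpred]
      have hds : (PySem.Set.ofList t).discard y
          = List.filter (fun k => !(k == y)) (PySem.Set.ofList t) := rfl
      rw [hds, List.filter_cons]
      have hny : (!(d.contains y)) = true := by simpa using hy
      simp only [hny, if_pos, List.filter_filter, List.append_assoc, List.singleton_append]
      rw [hcomm]

-- getD of B's add-in fold, viewed over key/value pairs
lemma pvGetD_fold2 (ps : List (String × Int)) (d : PySem.Dict String Int) (k : String) :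
    (ps.foldl (fun pd kv => pd.insert kv.1 (pd.getD kv.1 0 + kv.2)) d).getD k 0
      = d.getD k 0 + ((ps.filter (fun kv => kv.1 == k)).map Prod.snd).sum := by
  induction ps generalizing d with
  | nil => simp
  | cons p rest ih =>
    obtain ⟨k', v⟩ := p
    simp only [List.foldl_cons, ih, List.filter_cons]
    by_cases h : k' = k
    · subst h
      simp [PySem.Dict.getD_insert_self]; ring
    · have h' : k ≠ k' := fun he => h he.symm
      simp [PySem.Dict.getD_insert_of_ne _ _ _ h', h]

-- keys of B's add-in fold (the keys folded over are distinct)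
lemma pvKeys_fold2 (ps : List (String × Int)) (d : PySem.Dict String Int)
    (hnd : (ps.map Prod.fst).Nodup) :
    (ps.foldl (fun pd kv => pd.insert kv.1 (pd.getD kv.1 0 + kv.2)) d).keys
      = d.keys ++ (ps.map Prod.fst).filter (fun k => !(d.contains k)) := by
  induction ps generalizing d with
  | nil => simp
  | cons p rest ih =>
    obtain ⟨k, v⟩ := p
    simp only [List.map_cons, List.nodup_cons] at hnd
    obtain ⟨hk_notin, hrest⟩ := hnd
    simp only [List.foldl_cons, ih _ hrest, List.map_cons, List.filter_cons]
    by_cases hk : d.contains k = true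
    · rw [PySem.Dict.keys_insert_of_contains d _ hk]
      have hpred : (fun k' => !((d.insert k (d.getD k 0 + v)).contains k'))
          = fun k' => !(k' == k) && !(d.contains k') := by
        funext k'
        rw [PySem.Dict.contains_insert]
        by_cases h : k' = k
        · subst h; simp [hk]
        · simp
      rw [hpred]
      have hfc : List.filter (fun k' => !(k' == k) && !(d.contains k')) (rest.map Prod.fst)
          = List.filter (fun k' => !(d.contains k')) (rest.map Prod.fst) := by
        apply List.filter_congr
        intro x hx
        have hxk : x ≠ k := fun he => hk_notin (he ▸ hx)
        simp [hxk]
      rw [hfc]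
      simp only [hk, Bool.not_true]
      rfl
    · rw [PySem.Dict.keys_insert_of_not_contains d _ (by simpa using hk)]
      have hpred : (fun k' => !((d.insert k (d.getD k 0 + v)).contains k'))
          = fun k' => !(k' == k) && !(d.contains k') := by
        funext k'
        rw [PySem.Dict.contains_insert]
        by_cases h : k' = k
        · subst h; simp
        · simp
      rw [hpred]
      have hfc : List.filter (fun k' => !(k' == k) && !(d.contains k')) (rest.map Prod.fst)
          = List.filter (fun k' => !(d.contains k')) (rest.map Prod.fst) := by
        apply List.filter_congr
        intro x hx
        have hxk : x ≠ k := fun he => hk_notin (he ▸ hx)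
        simp [hxk]
      rw [hfc]
      have hny : (!(d.contains k)) = true := by simpa using hk
      simp only [hny, if_pos, List.append_assoc, List.singleton_append]

-- filtering a duplicate-free list for one element
lemma pvFilter_beq_of_nodup (l : List String) (hl : l.Nodup) (k : String) :
    l.filter (fun x => x == k) = if k ∈ l then [k] else [] := by
  induction l with
  | nil => simp
  | cons a t ih =>
    simp only [List.nodup_cons] at hl
    rw [List.filter_cons]
    by_cases h : a = k
    · subst h
      have ht : t.filter (fun x => x == a) = [] := by
        rw [ih hl.2]
        simp [hl.1]
      simp [ht]
    · rw [ih hl.2]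
      simp [h, Ne.symm h]

-- the contribution at key k of B's (distinct key, count) pairs is ys.count k
lemma pvSum_counts (ys : List String) (k : String) :
    ((((PySem.Set.ofList ys).map (fun k => (k, (ys.count k : Int)))).filter
        (fun kv => kv.1 == k)).map Prod.snd).sum = (ys.count k : Int) := by
  rw [List.filter_map]
  have : ((PySem.Set.ofList ys).filter ((fun kv => kv.1 == k) ∘ (fun k => (k, (ys.count k : Int)))))
      = (PySem.Set.ofList ys).filter (fun x => x == k) := rfl
  rw [this, pvFilter_beq_of_nodup _ (PySem.Set.nodup_ofList ys) k]
  by_cases h : k ∈ ys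
  · simp [PySem.Set.mem_ofList, h]
  · have h0 : ys.count k = 0 := List.count_eq_zero.mpr h
    simp [PySem.Set.mem_ofList, h, h0]

-- ===== VERDICT (by name: the statement is the Claim_ definition above) =====
theorem plan_counts_spec : Claim_equal_plan_counts := by
  intro arr pc _dom
  unfold Spec_plan_counts plan_counts plan_counts_alt
  dsimp only
  -- A's loop is the counting fold over the matching items
  have hA : (arr.foldl (fun d i =>
        if pvMatch i then
          if d.contains i then d.modify i 0 (· + 1) else d.insert i 1
        else d) (PySem.Dict.ofList pc))
      = ((arr.filter pvMatch).foldl (fun d i => d.insert i (d.getD i 0 + 1))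
          (PySem.Dict.ofList pc)) := by
    rw [List.foldl_filter]
    congr 1
    funext d i
    rw [pvStepA_eq]
  rw [hA]
  set ys := arr.filter pvMatch with hys
  set d0 := PySem.Dict.ofList pc with hd0
  set ps := (PySem.Set.ofList ys).map (fun k => (k, (ys.count k : Int))) with hps
  -- B's fold over distinct keys is the pair fold over ps
  have hB : ((PySem.Set.ofList ys).foldl
        (fun pd k => pd.insert k (pd.getD k 0 + (ys.count k : Int))) d0)
      = ps.foldl (fun pd kv => pd.insert kv.1 (pd.getD kv.1 0 + kv.2)) d0 := by
    rw [hps, List.foldl_map]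
  rw [hB]
  have hpsfst : ps.map Prod.fst = PySem.Set.ofList ys := by
    simp only [hps, List.map_map]
    exact (List.map_congr_left fun x _ => rfl).trans (List.map_id _)
  have hndps : (ps.map Prod.fst).Nodup := by
    rw [hpsfst]; exact PySem.Set.nodup_ofList ys
  -- the two result dicts have the same keys …
  have hkeys : (ys.foldl (fun d i => d.insert i (d.getD i 0 + 1)) d0).keys
      = (ps.foldl (fun pd kv => pd.insert kv.1 (pd.getD kv.1 0 + kv.2)) d0).keys := by
    rw [pvKeys_fold1, pvKeys_fold2 _ _ hndps, hpsfst]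
  -- … and agree on every lookup
  have hgetD : ∀ k, (ys.foldl (fun d i => d.insert i (d.getD i 0 + 1)) d0).getD k 0
      = (ps.foldl (fun pd kv => pd.insert kv.1 (pd.getD kv.1 0 + kv.2)) d0).getD k 0 := by
    intro k
    rw [pvGetD_fold1, pvGetD_fold2, hps, pvSum_counts]
  -- the keys of A's result carry no duplicates
  have hnodup : (ys.foldl (fun d i => d.insert i (d.getD i 0 + 1)) d0).keys.Nodup := by
    rw [pvKeys_fold1]
    refine List.Nodup.append (PySem.Dict.nodup_keys_ofList pc) ((PySem.Set.nodup_ofList ys).filter _) ?_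
    intro a ha hb
    have := List.of_mem_filter hb
    have hnc : d0.contains a = false := by simpa using this
    have : d0.contains a = true := (PySem.Dict.contains_iff_mem_keys d0 a).mpr ha
    simp [hnc] at this
  rw [PySem.Dict.items_eq_map_keys _ hnodup 0,
      PySem.Dict.items_eq_map_keys _ (hkeys ▸ hnodup) 0, hkeys]
  exact List.map_congr_left (fun k _ => by rw [hgetD k])
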